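-- pv_equiv track=rewrite | github.com/miliar/Code_Jam_Webscraper | solutions_python/Problem_96/467.py | solve
-- ===== SOURCE A (Python) =====
-- def solve(target, suprises, scores):
--     "do the solving"
--     found = 0
--     for score in scores:
--         if max(regular(score)) >= target:
--             found += 1
--         elif suprises and max(suprise(score)) >= target:
--             found += 1
--             suprises -= 1
--     return found
--
-- def regular(total):
--     "show the regular judges"
--     average, leftover = divmod(total, 3)
--     judges = tuple(
--             average for i in range(3 - leftover)
--     ) + tuple(
--             average + 1 for i in range(leftover)
--     )
--     return judges
--
-- def suprise(total):
--     "show the suprise judges"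
--     average, leftover = divmod(total, 3)
--     if leftover:
--         if average + leftover <= 10:
--             judges = (average, average, average + leftover)
--         else:
--             return regular(total)
--     elif average in (0, 10):
--         # Can't go out of bounds
--         judges = (average, average, average)
--     elif average > 0:
--         judges = (average - 1, average, average + 1)
--     return judges
-- ===== SOURCE B (Python) =====
-- def solve(target, suprises, scores):
--     "do the solving"
--     normal = sum(1 for score in scores if max(regular(score)) >= target)
--     if suprises == 0:
--         return normal
--     needy = sum(1 for score in scores
--                 if max(regular(score)) < target and max(suprise(score)) >= target)
--     return normal + min(suprises, needy)
--
-- def regular(total):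
--     "show the regular judges"
--     average, leftover = divmod(total, 3)
--     judges = tuple(
--             average for i in range(3 - leftover)
--     ) + tuple(
--             average + 1 for i in range(leftover)
--     )
--     return judges
--
-- def suprise(total):
--     "show the suprise judges"
--     average, leftover = divmod(total, 3)
--     if leftover:
--         if average + leftover <= 10:
--             judges = (average, average, average + leftover)
--         else:
--             return regular(total)
--     elif average in (0, 10):
--         # Can't go out of bounds
--         judges = (average, average, average)
--     elif average > 0:
--         judges = (average - 1, average, average + 1)
--     return judges
-- ===== Notes on version B (the rewrite author's own statement) =====
-- stated objective: alternative
-- what changed: Replaces the single greedy loop that mutates the suprises budget with two order-independent counts (scores passing with regular judges, and scores that need a surprise judging) combined as normal + min(suprises, needy).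
-- outside the precondition, e.g. on solve(2, -1, [3]): A returns 1, B returns -1; on solve(2, 1, [3, -3]): A returns 1, B raises UnboundLocalError
import Mathlib
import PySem

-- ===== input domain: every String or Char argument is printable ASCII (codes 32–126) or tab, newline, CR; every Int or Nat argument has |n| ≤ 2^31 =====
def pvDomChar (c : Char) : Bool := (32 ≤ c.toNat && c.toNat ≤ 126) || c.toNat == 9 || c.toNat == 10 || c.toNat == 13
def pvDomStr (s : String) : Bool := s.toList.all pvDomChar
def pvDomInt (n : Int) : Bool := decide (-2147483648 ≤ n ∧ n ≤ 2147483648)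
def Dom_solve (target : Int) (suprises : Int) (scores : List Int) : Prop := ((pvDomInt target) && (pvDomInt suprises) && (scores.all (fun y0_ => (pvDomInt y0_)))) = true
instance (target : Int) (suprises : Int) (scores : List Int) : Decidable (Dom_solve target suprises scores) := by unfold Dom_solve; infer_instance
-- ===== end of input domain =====

-- B replaces A's greedy budget-mutating loop by two independent counts combined with min (alternative decomposition, same cost).


-- ===== PORT A =====
-- Python max() over a (never-empty here) tuple of ints; [] case is unreachable junk.
def pyMax (xs : List Int) : Int :=
  match xs with
  | [] => 0
  | h :: t => t.foldl max h

-- tuple(average for i in range(3-leftover)) + tuple(average+1 for i in range(leftover))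
def regular (total : Int) : List Int :=
  let average := PySem.Int.floordiv total 3
  let leftover := PySem.Int.mod total 3
  List.replicate (3 - leftover).toNat average ++ List.replicate leftover.toNat (average + 1)

-- Python raises UnboundLocalError in the final (leftover = 0, average < 0) case; that
-- input is excluded by Pre_solve, the port returns junk [] there.
def suprise (total : Int) : List Int :=
  let average := PySem.Int.floordiv total 3
  let leftover := PySem.Int.mod total 3
  if leftover ≠ 0 then
    if average + leftover ≤ 10 then [average, average, average + leftover]
    else regular total
  else if average = 0 ∨ average = 10 then [average, average, average]
  else if average > 0 then [average - 1, average, average + 1]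
  else []

-- the for-loop of A, carrying (found, suprises) exactly as the Python does
def solveLoop (target : Int) (found : Int) (suprises : Int) (scores : List Int) : Int :=
  match scores with
  | [] => found
  | score :: rest =>
    if pyMax (regular score) ≥ target then
      solveLoop target (found + 1) suprises rest
    else if suprises ≠ 0 ∧ pyMax (suprise score) ≥ target then
      solveLoop target (found + 1) (suprises - 1) rest
    else
      solveLoop target found suprises rest

def solve (target : Int) (suprises : Int) (scores : List Int) : Int :=
  solveLoop target 0 suprises scores

-- ===== PORT B =====
def solve_alt (target : Int) (suprises : Int) (scores : List Int) : Int :=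
  let normal : Int := (scores.countP (fun s => decide (pyMax (regular s) ≥ target)) : Nat)
  if suprises = 0 then normal
  else
    let needy : Int :=
      (scores.countP (fun s =>
        decide (pyMax (regular s) < target) && decide (pyMax (suprise s) ≥ target)) : Nat)
    normal + min suprises needy

-- ===== PRECONDITION & SPEC =====
-- Pre_solve excludes negative surprise budgets (outside the natural domain: A treats any
-- nonzero budget as truthy, so a negative budget acts as unlimited) and, when the budget is
-- positive, scores that are negative multiples of 3 falling short of target under regular
-- judging, on which the Python suprise() raises UnboundLocalError (B raises there too).
def Pre_solve (target : Int) (suprises : Int) (scores : List Int) : Prop :=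
  0 ≤ suprises ∧
  (0 < suprises → ∀ s ∈ scores,
    ¬(s < 0 ∧ PySem.Int.mod s 3 = 0 ∧ PySem.Int.floordiv s 3 < target))
instance (target : Int) (suprises : Int) (scores : List Int) : Decidable (Pre_solve target suprises scores) := by unfold Pre_solve; infer_instance

def pvWitness_solve : Int × Int × List Int := (2, 1, [3, 4])

def Spec_solve (target : Int) (suprises : Int) (scores : List Int) (out : Int) : Prop := out = solve_alt target suprises scores
instance (target : Int) (suprises : Int) (scores : List Int) (out : Int) : Decidable (Spec_solve target suprises scores out) := by unfold Spec_solve; infer_instance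

-- ===== CLAIM (what is proved, stated in full; the proofs are below) =====
def Claim_equal_solve : Prop := ∀ (target : Int) (suprises : Int) (scores : List Int), Dom_solve target suprises scores → Pre_solve target suprises scores → Spec_solve target suprises scores (solve target suprises scores)

-- ===== LEMMAS AND PROOFS =====
-- Loop invariant: for a nonnegative budget, A's loop returns
-- found + (count passing regular) + min budget (count needing a surprise judging).
theorem solveLoop_eq (target : Int) :
    ∀ (scores : List Int) (found b : Int), 0 ≤ b →
      solveLoop target found b scores =
        found + (scores.countP (fun s => decide (pyMax (regular s) ≥ target)) : Nat)
          + min b ((scores.countP (fun s =>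
              decide (pyMax (regular s) < target) && decide (pyMax (suprise s) ≥ target)) : Nat)) := by
  intro scores
  induction scores with
  | nil => intro found b hb; simp [solveLoop]; omega
  | cons s rest ih =>
    intro found b hb
    by_cases hR : pyMax (regular s) ≥ target
    · have h1 : ¬ pyMax (regular s) < target := by omega
      simp [solveLoop, hR, h1, ih (found + 1) b hb]
      omega
    · have h1 : pyMax (regular s) < target := by omega
      by_cases hS : pyMax (suprise s) ≥ target
      · by_cases hb0 : b = 0
        · subst hb0
          simp [solveLoop, hR, h1, hS, ih found 0 le_rfl]
          omega
        · have hb1 : (0:Int) ≤ b - 1 := by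
            rcases lt_or_eq_of_le hb with h | h
            · omega
            · omega
          simp [solveLoop, hR, hb0, h1, hS, ih (found + 1) (b - 1) hb1]
          omega
      · simp [solveLoop, hR, h1, hS, ih found b hb]

-- ===== VERDICT (by name: the statement is the Claim_ definition above) =====
theorem solve_spec : Claim_equal_solve := by
  intro target suprises scores _ hpre
  unfold Spec_solve solve solve_alt
  rw [solveLoop_eq target scores 0 suprises hpre.1]
  by_cases hz : suprises = 0
  · subst hz; simp
  · simp [hz]
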